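-- pv_equiv track=rewrite | github.com/mateors1/pubmed-relationship-checker | find_PMID_relationships.py | find_tuples
-- ===== SOURCE A (Python) =====
-- def find_tuples(article_relationships):
--     tuples = set()
--
--     for article_id, related_articles in article_relationships.items():
--         for related_PMID in related_articles.get(article_id, []):
--             if related_PMID in article_relationships and article_id in article_relationships[related_PMID].get(related_PMID, []):
--                 ordered_tuple = (article_id, related_PMID)
--                 tuples.add(ordered_tuple)
--
--
--     return tuples
-- ===== SOURCE B (Python) =====
-- def find_tuples(article_relationships):
--     edges = {(x, y)
--              for x, rel in article_relationships.items()
--              for y in rel.get(x, [])}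
--     return edges & {(y, x) for (x, y) in edges}
-- ===== Notes on version B (the rewrite author's own statement) =====
-- stated objective: simpler
-- what changed: Replaces A's per-candidate nested-dict reciprocity navigation with one flat edge set E built up front and a set-algebra self-join: return E & {(y, x) for (x, y) in E}.
import Mathlib
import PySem

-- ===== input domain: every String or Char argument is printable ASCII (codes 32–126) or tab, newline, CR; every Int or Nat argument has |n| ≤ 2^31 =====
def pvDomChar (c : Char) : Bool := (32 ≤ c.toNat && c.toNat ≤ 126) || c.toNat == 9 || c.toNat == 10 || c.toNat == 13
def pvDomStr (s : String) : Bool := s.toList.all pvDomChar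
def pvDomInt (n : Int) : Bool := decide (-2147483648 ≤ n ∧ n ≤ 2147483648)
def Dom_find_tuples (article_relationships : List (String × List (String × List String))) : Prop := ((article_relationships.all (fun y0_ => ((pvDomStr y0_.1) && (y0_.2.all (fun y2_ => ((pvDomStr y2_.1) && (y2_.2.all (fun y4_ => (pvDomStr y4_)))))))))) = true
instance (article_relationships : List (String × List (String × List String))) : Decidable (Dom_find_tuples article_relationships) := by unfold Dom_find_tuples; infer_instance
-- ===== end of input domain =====

-- B replaces A's per-edge nested-dict reciprocity navigation by building the flat edge set once and
-- intersecting it with its own reversal (objective: simpler). Both Pythons return a set; outputs are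
-- compared as finite sets.

-- ===== PORT A =====
def find_tuples (article_relationships : List (String × List (String × List String))) : List (String × String) :=
  article_relationships.foldl (fun tuples p =>
    (PySem.Dict.getD (PySem.Dict.mk p.2) p.1 []).foldl (fun tuples related_PMID =>
      if (PySem.Dict.mk article_relationships).contains related_PMID &&
         (PySem.Dict.getD (PySem.Dict.mk ((PySem.Dict.mk article_relationships).getD related_PMID []))
            related_PMID []).contains p.1
      then PySem.Set.add tuples (p.1, related_PMID) else tuples) tuples) PySem.Set.empty

-- ===== PORT B =====
def find_tuples_alt (article_relationships : List (String × List (String × List String))) : List (String × String) :=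
  let edges : PySem.Set (String × String) :=
    PySem.Set.ofList (article_relationships.flatMap (fun p =>
      (PySem.Dict.getD (PySem.Dict.mk p.2) p.1 []).map (fun y => (p.1, y))))
  PySem.Set.inter edges (PySem.Set.ofList (edges.map (fun e => (e.2, e.1))))

-- ===== PRECONDITION & SPEC =====
-- Pre_ excludes association lists with duplicate outer keys: such a list does not arise from any
-- Python dict (dict construction collapses duplicate keys), so A's behaviour there is unspecified.
def Pre_find_tuples (article_relationships : List (String × List (String × List String))) : Prop :=
  (article_relationships.map Prod.fst).Nodup
instance (article_relationships : List (String × List (String × List String))) : Decidable (Pre_find_tuples article_relationships) := by unfold Pre_find_tuples; infer_instance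

def pvWitness_find_tuples : (List (String × List (String × List String))) :=
  [("a", [("a", ["b"])]), ("b", [("b", ["a"])])]

def Spec_find_tuples (article_relationships : List (String × List (String × List String))) (out : List (String × String)) : Prop := out = find_tuples_alt article_relationships
instance (article_relationships : List (String × List (String × List String))) (out : List (String × String)) : Decidable (Spec_find_tuples article_relationships out) := by unfold Spec_find_tuples; infer_instance

-- ===== CLAIM (what is proved, stated in full; the proofs are below) =====
def Claim_equal_find_tuples : Prop := ∀ (article_relationships : List (String × List (String × List String))), Dom_find_tuples article_relationships → Pre_find_tuples article_relationships → Spec_find_tuples article_relationships (find_tuples article_relationships)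

-- ===== LEMMAS AND PROOFS =====

-- the flat edge list generated in order, and the per-edge reciprocity test of A
def pvEdges (ar : List (String × List (String × List String))) : List (String × String) :=
  ar.flatMap (fun p => (PySem.Dict.getD (PySem.Dict.mk p.2) p.1 []).map (fun y => (p.1, y)))

def pvQ (ar : List (String × List (String × List String))) (e : String × String) : Bool :=
  (PySem.Dict.mk ar).contains e.2 &&
  (PySem.Dict.getD (PySem.Dict.mk ((PySem.Dict.mk ar).getD e.2 [])) e.2 []).contains e.1

-- A's nested loops are the flat fold of the conditional Set.add over pvEdges
theorem find_tuples_eq_fold (ar : List (String × List (String × List String))) :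
    find_tuples ar =
      (pvEdges ar).foldl (fun t e => if pvQ ar e then PySem.Set.add t e else t) [] := by
  unfold find_tuples pvEdges pvQ
  rw [List.foldl_flatMap]
  simp only [List.foldl_map]
  rfl

-- filtering commutes with Set.add
theorem filter_set_add {α : Type} [BEq α] [LawfulBEq α] (t : List α) (x : α) (q : α → Bool) :
    (PySem.Set.add t x).filter q = if q x then PySem.Set.add (t.filter q) x else t.filter q := by
  by_cases h : x ∈ t
  · have hf : x ∈ t.filter q ↔ q x = true := by simp [List.mem_filter, h]
    rw [PySem.Set.add_of_mem h]
    by_cases hq : q x = true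
    · rw [if_pos hq, PySem.Set.add_of_mem (hf.mpr hq)]
    · simp [hq]
  · rw [PySem.Set.add_of_not_mem h, List.filter_append]
    by_cases hq : q x = true
    · have : x ∉ t.filter q := fun hx => h (List.mem_of_mem_filter hx)
      rw [if_pos hq, PySem.Set.add_of_not_mem this]
      simp [hq]
    · simp [hq]

-- the conditional-add fold is the filter of the deduplicated list
theorem fold_add_if_eq_filter_update {α : Type} [BEq α] [LawfulBEq α]
    (q : α → Bool) (l : List α) (t : PySem.Set α) :
    l.foldl (fun a e => if q e then PySem.Set.add a e else a) (t.filter q) =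
      (PySem.Set.update t l).filter q := by
  induction l generalizing t with
  | nil => rfl
  | cons x xs ih =>
    rw [PySem.Set.update_cons, List.foldl_cons, ← filter_set_add t x q, ih]

-- the reciprocity test equals reverse-edge membership, given unique outer keys
theorem pvQ_iff_rev_mem (ar : List (String × List (String × List String)))
    (hnd : (ar.map Prod.fst).Nodup) (e : String × String) :
    pvQ ar e = true ↔ (e.2, e.1) ∈ pvEdges ar := by
  have hkeys : (PySem.Dict.mk ar).keys.Nodup := hnd
  constructor
  · intro h
    unfold pvQ at h
    rw [Bool.and_eq_true] at h
    obtain ⟨hc, hm⟩ := h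
    rw [PySem.Dict.contains_eq_isSome_get?] at hc
    obtain ⟨rel, hrel⟩ := Option.isSome_iff_exists.mp hc
    have hitems : (e.2, rel) ∈ (PySem.Dict.mk ar).items :=
      PySem.Dict.mem_items_of_get?_eq_some _ hrel
    rw [PySem.Dict.getD_of_get?_eq_some _ _ hrel] at hm
    unfold pvEdges
    rw [List.mem_flatMap]
    exact ⟨(e.2, rel), hitems, by
      rw [List.mem_map]
      exact ⟨e.1, by simpa using hm, rfl⟩⟩
  · intro h
    unfold pvEdges at h
    rw [List.mem_flatMap] at h
    obtain ⟨p, hp, hmem⟩ := h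
    rw [List.mem_map] at hmem
    obtain ⟨y, hy, hey⟩ := hmem
    have h1 : p.1 = e.2 := congrArg Prod.fst hey
    have h2 : y = e.1 := congrArg Prod.snd hey
    have hget : (PySem.Dict.mk ar).get? p.1 = some p.2 :=
      PySem.Dict.get?_of_mem_items _ (by exact hp) hkeys
    unfold pvQ
    rw [Bool.and_eq_true, ← h1]
    refine ⟨by rw [PySem.Dict.contains_eq_isSome_get?, hget]; rfl, ?_⟩
    rw [PySem.Dict.getD_of_get?_eq_some _ _ hget]
    subst h2
    simpa using hy

-- ===== VERDICT (by name: the statement is the Claim_ definition above) =====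
theorem find_tuples_spec : Claim_equal_find_tuples := by
  intro ar _ hpre
  unfold Spec_find_tuples find_tuples_alt
  rw [find_tuples_eq_fold]
  have h0 : ([] : List (String × String)) = List.filter (pvQ ar) [] := rfl
  rw [h0, fold_add_if_eq_filter_update, PySem.Set.update_nil_left]
  unfold PySem.Set.inter
  refine List.filter_congr ?_
  intro e _
  have hrev : (PySem.Set.ofList (((PySem.Set.ofList (pvEdges ar)) : List (String × String)).map
        (fun f => (f.2, f.1)))).contains e = true ↔ (e.2, e.1) ∈ pvEdges ar := by
    rw [PySem.Set.contains_iff, PySem.Set.mem_ofList, List.mem_map]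
    constructor
    · rintro ⟨f, hf, rfl⟩
      simpa using (PySem.Set.mem_ofList _ _).mp hf
    · intro h
      exact ⟨(e.2, e.1), (PySem.Set.mem_ofList _ _).mpr h, rfl⟩
  by_cases hq : pvQ ar e = true
  · rw [hq]
    exact (hrev.mpr ((pvQ_iff_rev_mem ar hpre e).mp hq)).symm
  · rw [Bool.not_eq_true] at hq
    rw [hq]
    symm
    rw [Bool.eq_false_iff]
    intro hc
    exact absurd ((pvQ_iff_rev_mem ar hpre e).mpr (hrev.mp hc)) (by rw [hq]; simp)
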